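-- pv_equiv track=rewrite | github.com/tgyuuAn/Algorithm | Programmers/Number_Control_python.py | solution
-- ===== SOURCE A (Python) =====
-- def solution(n, control):
--     for key in list(control):
--         if key == "w":
--             n+=1
--         elif key =="s":
--             n-=1
--         elif key =="a":
--             n-=10
--         else:
--             n+=10
--     return n
-- ===== SOURCE B (Python) =====
-- def solution(n, control):
--     w = control.count("w")
--     s = control.count("s")
--     a = control.count("a")
--     return n + w - s - 10 * a + 10 * (len(control) - w - s - a)
-- ===== Notes on version B (the rewrite author's own statement) =====
-- stated objective: simpler
-- what changed: Replaced the per-character loop with branches by aggregate character counts and one closed-form arithmetic expression (every non-w/s/a character contributes +10, exactly as A's else branch); the counting runs in C-level str.count.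
import Mathlib
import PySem

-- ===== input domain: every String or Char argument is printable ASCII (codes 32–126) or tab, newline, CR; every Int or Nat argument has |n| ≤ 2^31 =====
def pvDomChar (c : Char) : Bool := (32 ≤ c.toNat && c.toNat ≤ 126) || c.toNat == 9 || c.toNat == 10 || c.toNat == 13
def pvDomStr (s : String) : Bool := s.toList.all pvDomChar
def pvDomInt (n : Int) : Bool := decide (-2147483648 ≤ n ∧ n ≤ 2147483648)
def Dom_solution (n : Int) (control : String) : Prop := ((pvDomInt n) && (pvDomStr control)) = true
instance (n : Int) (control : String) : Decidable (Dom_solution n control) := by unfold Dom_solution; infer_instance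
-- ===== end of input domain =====

-- B replaces A's per-character branching loop by aggregate counts and one closed-form expression (objective: simpler).

-- ===== PORT A =====
-- for key in list(control): branch on key and update n
def solution (n : Int) (control : String) : Int :=
  control.toList.foldl
    (fun n key =>
      if key == 'w' then n + 1
      else if key == 's' then n - 1
      else if key == 'a' then n - 10
      else n + 10) n

-- ===== PORT B =====
def solution_alt (n : Int) (control : String) : Int :=
  let w : Int := PySem.Str.count control "w"
  let s : Int := PySem.Str.count control "s"
  let a : Int := PySem.Str.count control "a"
  n + w - s - 10 * a + 10 * ((PySem.Str.len control : Int) - w - s - a)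

-- ===== PRECONDITION & SPEC =====
def Spec_solution (n : Int) (control : String) (out : Int) : Prop := out = solution_alt n control
instance (n : Int) (control : String) (out : Int) : Decidable (Spec_solution n control out) := by unfold Spec_solution; infer_instance

-- ===== CLAIM (what is proved, stated in full; the proofs are below) =====
def Claim_equal_solution : Prop := ∀ (n : Int) (control : String), Dom_solution n control → Spec_solution n control (solution n control)

-- ===== LEMMAS AND PROOFS =====

-- PySem.Chars.count with a single-character needle is List.count.
theorem chars_count_go_single (c : Char) :
    ∀ (l : List Char) (fuel acc : Nat), l.length ≤ fuel →
      PySem.Chars.count.go [c] fuel l acc = acc + l.count c := by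
  intro l
  induction l with
  | nil =>
      intro fuel acc _
      cases fuel <;> simp [PySem.Chars.count.go]
  | cons h t ih =>
      intro fuel acc hle
      cases fuel with
      | zero => simp at hle
      | succ f =>
          have ht : t.length ≤ f := by simpa using Nat.le_of_succ_le_succ hle
          by_cases hc : h = c
          · subst hc
            have : [h].isPrefixOf (h :: t) = true := by simp [List.isPrefixOf]
            simp only [PySem.Chars.count.go, this, if_true, List.length_singleton,
              List.drop_succ_cons, List.drop_zero, ih f (acc + 1) ht, List.count_cons_self]
            omega
          · have : [c].isPrefixOf (h :: t) = false := by
              simp only [List.isPrefixOf, List.isPrefixOf_nil_left, Bool.and_true,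
                beq_eq_false_iff_ne, ne_eq]
              exact fun e => hc e.symm
            simp only [PySem.Chars.count.go, this, Bool.false_eq_true, if_false,
              ih f acc ht, List.count_cons_of_ne (fun e => hc e)]

theorem chars_count_single (l : List Char) (c : Char) :
    PySem.Chars.count l [c] = l.count c := by
  simp [PySem.Chars.count, chars_count_go_single c l l.length 0 le_rfl]

theorem str_count_single (s : String) (c : Char) :
    PySem.Str.count s (String.ofList [c]) = s.toList.count c := by
  have h : (String.ofList [c]).toList = [c] := by simp
  rw [PySem.Str.count_eq, h, chars_count_single]

-- A's loop equals the closed form over any char list.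
theorem loop_closed (l : List Char) : ∀ (n : Int),
    l.foldl
      (fun n key =>
        if key == 'w' then n + 1
        else if key == 's' then n - 1
        else if key == 'a' then n - 10
        else n + 10) n
    = n + (l.count 'w' : Int) - (l.count 's' : Int) - 10 * (l.count 'a' : Int)
        + 10 * ((l.length : Int) - (l.count 'w' : Int) - (l.count 's' : Int) - (l.count 'a' : Int)) := by
  induction l with
  | nil => intro n; simp
  | cons h t ih =>
      intro n
      simp only [List.foldl_cons, List.count_cons, List.length_cons, ih]
      by_cases hw : h = 'w'
      · simp [hw]; push_cast; ring
      · by_cases hs : h = 's'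
        · simp [hw, hs]; push_cast; ring
        · by_cases ha : h = 'a'
          · simp [hw, hs, ha]; push_cast; ring
          · simp [hw, hs, ha]; push_cast; ring

-- ===== VERDICT (by name: the statement is the Claim_ definition above) =====
theorem solution_spec : Claim_equal_solution := by
  intro n control _
  show solution n control = solution_alt n control
  unfold solution solution_alt
  have hw := str_count_single control 'w'
  have hs := str_count_single control 's'
  have ha := str_count_single control 'a'
  simp only [loop_closed]
  rw [show ("w" : String) = String.ofList ['w'] from rfl,
      show ("s" : String) = String.ofList ['s'] from rfl,
      show ("a" : String) = String.ofList ['a'] from rfl,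
      hw, hs, ha, PySem.Str.len_eq]
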